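-- pv_equiv track=rewrite | github.com/bootcamp-students/w23-warmups | soper-preston/python_rectangle_into_squares.py | sq_in_rect
-- ===== SOURCE A (Python) =====
-- def sq_in_rect(lng, wdth):
--     # your code
--     output = []
--     area = lng * wdth
--     if lng == wdth:
--         return None
--     while area > 0:
--         if lng < wdth:
--             output.append(lng)
--             wdth = wdth - lng
--             area -= lng * lng
--         else:
--             output.append(wdth)
--             lng = lng - wdth
--             area -= wdth * wdth
--     return output
-- ===== SOURCE B (Python) =====
-- def sq_in_rect(lng, wdth):
--     if lng == wdth:
--         return None
--     output = []
--     while lng > 0 and wdth > 0: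
--         s, b = (lng, wdth) if lng < wdth else (wdth, lng)
--         q, r = divmod(b, s)
--         output.extend([s] * q)
--         if lng < wdth:
--             wdth = r
--         else:
--             lng = r
--     return output
-- ===== Notes on version B (the rewrite author's own statement) =====
-- stated objective: simpler
-- what changed: B replaces A's one-square-at-a-time subtraction loop with a batched Euclidean loop (divmod: append min q times, replace the larger side by the remainder) guarded by 'both sides positive', dropping A's redundant area accumulator.
-- intended difference: On inputs with both sides negative and unequal, A's area>0 test fires once and it returns a one-element list [min(lng,wdth)] (an artefact of tracking the signed area), while B returns [], the intended empty tiling for a degenerate rectangle. — e.g. on sq_in_rect(-1, -2): A returns some [-2], B returns some []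
import Mathlib
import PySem

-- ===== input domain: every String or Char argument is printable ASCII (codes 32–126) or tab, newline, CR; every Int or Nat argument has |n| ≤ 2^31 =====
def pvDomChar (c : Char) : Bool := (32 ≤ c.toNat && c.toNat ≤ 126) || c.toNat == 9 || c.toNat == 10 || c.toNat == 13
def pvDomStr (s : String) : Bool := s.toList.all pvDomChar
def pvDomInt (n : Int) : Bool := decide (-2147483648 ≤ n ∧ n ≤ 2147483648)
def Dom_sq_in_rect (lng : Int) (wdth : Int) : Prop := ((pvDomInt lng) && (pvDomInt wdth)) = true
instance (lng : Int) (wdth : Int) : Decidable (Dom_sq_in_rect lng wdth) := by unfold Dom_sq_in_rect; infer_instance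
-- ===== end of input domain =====

-- B replaces A's one-square-at-a-time subtraction loop with a batched divmod Euclidean loop and
-- drops A's area accumulator; on both-negative unequal inputs B returns [] where A returns [min] (see D_).

-- ===== PORT A =====
-- A's while-loop, fuel-indexed: state (output, lng, wdth, area); fuel (area.toNat + 1 at entry)
-- is provably enough, since every executed iteration lowers area.toNat (or ends the loop).
def sqLoopA (fuel : Nat) (output : List Int) (lng wdth area : Int) : List Int :=
  match fuel with
  | 0 => output
  | fuel + 1 =>
    if area > 0 then
      if lng < wdth then
        sqLoopA fuel (output ++ [lng]) lng (wdth - lng) (area - lng * lng)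
      else
        sqLoopA fuel (output ++ [wdth]) (lng - wdth) wdth (area - wdth * wdth)
    else output

def sq_in_rect (lng : Int) (wdth : Int) : Option (List Int) :=
  if lng = wdth then none
  else some (sqLoopA ((lng * wdth).toNat + 1) [] lng wdth (lng * wdth))

-- ===== PORT B =====
-- B's while-loop: while lng > 0 and wdth > 0, batch-append min (b // s) times, larger side := b % s.
def sqLoopB (output : List Int) (lng wdth : Int) : List Int :=
  if 0 < lng ∧ 0 < wdth then
    if lng < wdth then
      sqLoopB (output ++ List.replicate (PySem.Int.floordiv wdth lng).toNat lng)
        lng (PySem.Int.mod wdth lng)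
    else
      sqLoopB (output ++ List.replicate (PySem.Int.floordiv lng wdth).toNat wdth)
        (PySem.Int.mod lng wdth) wdth
  else output
termination_by (lng.toNat + wdth.toNat)
decreasing_by
  · rw [PySem.Int.mod_eq_emod_of_pos (by omega)]
    have := Int.emod_lt_of_pos wdth (show (0:Int) < lng by omega)
    have := Int.emod_nonneg wdth (show (lng:Int) ≠ 0 by omega)
    omega
  · rw [PySem.Int.mod_eq_emod_of_pos (by omega)]
    have := Int.emod_lt_of_pos lng (show (0:Int) < wdth by omega)
    have := Int.emod_nonneg lng (show (wdth:Int) ≠ 0 by omega)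
    omega

def sq_in_rect_alt (lng : Int) (wdth : Int) : Option (List Int) :=
  if lng = wdth then none else some (sqLoopB [] lng wdth)

-- ===== PRECONDITION & SPEC =====
-- On inputs with both sides negative and unequal, A's area>0 test fires once and it returns the
-- one-element list [min(lng,wdth)] (an artefact of tracking the signed area), while B returns [],
-- the intended empty tiling for a degenerate rectangle.
def D_sq_in_rect (lng : Int) (wdth : Int) : Prop := lng < 0 ∧ wdth < 0 ∧ lng ≠ wdth
instance (lng : Int) (wdth : Int) : Decidable (D_sq_in_rect lng wdth) := by
  unfold D_sq_in_rect; infer_instance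

def Spec_sq_in_rect (lng : Int) (wdth : Int) (out : Option (List Int)) : Prop :=
  ¬ D_sq_in_rect lng wdth → out = sq_in_rect_alt lng wdth
instance (lng : Int) (wdth : Int) (out : Option (List Int)) : Decidable (Spec_sq_in_rect lng wdth out) := by
  unfold Spec_sq_in_rect; infer_instance

def pvDiffWitness_sq_in_rect : Int × Int := (-1, -2)
def pvDiffWitnessOut_sq_in_rect : (Option (List Int)) × (Option (List Int)) :=
  (some [-2], some [])

-- ===== CLAIM (what is proved, stated in full; the proofs are below) =====
def Claim_unchanged_sq_in_rect : Prop := ∀ (lng : Int) (wdth : Int), Dom_sq_in_rect lng wdth → Spec_sq_in_rect lng wdth (sq_in_rect lng wdth)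
def Claim_changed_sq_in_rect : Prop := Dom_sq_in_rect (pvDiffWitness_sq_in_rect.1) (pvDiffWitness_sq_in_rect.2) ∧ D_sq_in_rect (pvDiffWitness_sq_in_rect.1) (pvDiffWitness_sq_in_rect.2) ∧ sq_in_rect (pvDiffWitness_sq_in_rect.1) (pvDiffWitness_sq_in_rect.2) = pvDiffWitnessOut_sq_in_rect.1 ∧ sq_in_rect_alt (pvDiffWitness_sq_in_rect.1) (pvDiffWitness_sq_in_rect.2) = pvDiffWitnessOut_sq_in_rect.2 ∧ pvDiffWitnessOut_sq_in_rect.1 ≠ pvDiffWitnessOut_sq_in_rect.2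
def Claim_exact_sq_in_rect : Prop := ∀ (lng : Int) (wdth : Int), Dom_sq_in_rect lng wdth → D_sq_in_rect lng wdth → sq_in_rect lng wdth ≠ sq_in_rect_alt lng wdth

-- ===== LEMMAS AND PROOFS =====

-- reference function: the greedy square list, one square at a time
def euclid (lng wdth : Int) : List Int :=
  if 0 < lng ∧ 0 < wdth then
    if lng < wdth then lng :: euclid lng (wdth - lng)
    else wdth :: euclid (lng - wdth) wdth
  else []
termination_by (lng.toNat + wdth.toNat)
decreasing_by all_goals omega

theorem euclid_symm_aux (n : Nat) : ∀ (lng wdth : Int), lng.toNat + wdth.toNat ≤ n →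
    euclid lng wdth = euclid wdth lng := by
  induction n with
  | zero =>
    intro lng wdth hn
    conv_lhs => rw [euclid]
    conv_rhs => rw [euclid]
    rw [if_neg (by omega), if_neg (by omega)]
  | succ n ih =>
    intro lng wdth hn
    by_cases hp : 0 < lng ∧ 0 < wdth
    · rcases lt_trichotomy lng wdth with hlt | heq | hgt
      · conv_lhs => rw [euclid]
        conv_rhs => rw [euclid]
        rw [if_pos hp, if_pos hlt, if_pos (show 0 < wdth ∧ 0 < lng from ⟨hp.2, hp.1⟩),
          if_neg (show ¬ wdth < lng by omega), ih lng (wdth - lng) (by omega)]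
      · rw [heq]
      · conv_lhs => rw [euclid]
        conv_rhs => rw [euclid]
        rw [if_pos hp, if_neg (show ¬ lng < wdth by omega),
          if_pos (show 0 < wdth ∧ 0 < lng from ⟨hp.2, hp.1⟩), if_pos hgt,
          ih (lng - wdth) wdth (by omega)]
    · conv_lhs => rw [euclid]
      conv_rhs => rw [euclid]
      rw [if_neg hp, if_neg (by omega)]

theorem euclid_symm (lng wdth : Int) : euclid lng wdth = euclid wdth lng :=
  euclid_symm_aux (lng.toNat + wdth.toNat) lng wdth le_rfl

theorem euclid_batch_aux (n : Nat) : ∀ (s b : Int), 0 < s → s ≤ b → b.toNat ≤ n →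
    euclid s b = List.replicate (b / s).toNat s ++ euclid (b % s) s := by
  induction n with
  | zero => intro s b hs hb hn; omega
  | succ n ih =>
    intro s b hs hb hn
    by_cases hr : s ≤ b - s
    · -- at least two full squares: peel one square, divmod shifts by one
      have hd : (b - s) / s = b / s - 1 := by
        rw [show b - s = b + -1 * s by ring, Int.add_mul_ediv_right _ _ (ne_of_gt hs)]
        ring
      have hm : (b - s) % s = b % s := by
        rw [show b - s = b + -1 * s by ring]
        exact Int.add_mul_emod_self_right b (-1) s
      have hq1 : 1 ≤ b / s := by
        rw [Int.le_ediv_iff_mul_le hs]; omega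
      conv_lhs => rw [euclid]
      rw [if_pos ⟨hs, by omega⟩, if_pos (by omega),
        ih s (b - s) hs hr (by omega), hd, hm,
        show (b / s).toNat = (b / s - 1).toNat + 1 by omega,
        List.replicate_succ, List.cons_append]
    · -- last batch: quotient 1, remainder b - s
      have hd : b / s = 1 := by
        conv_lhs => rw [show b = (b - s) + 1 * s by ring,
          Int.add_mul_ediv_right _ _ (ne_of_gt hs)]
        rw [Int.ediv_eq_zero_of_lt (a := b - s) (b := s) (by omega) (by omega)]
        norm_num
      have hm : b % s = b - s := by
        conv_lhs => rw [show b = (b - s) + 1 * s by ring, Int.add_mul_emod_self_right]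
        exact Int.emod_eq_of_lt (a := b - s) (b := s) (by omega) (by omega)
      rcases lt_or_eq_of_le hb with hlt | heq
      · conv_lhs => rw [euclid]
        rw [if_pos ⟨hs, by omega⟩, if_pos hlt, hd, hm, euclid_symm s (b - s)]
        rfl
      · conv_lhs => rw [euclid]
        rw [if_pos ⟨hs, by omega⟩, if_neg (by omega), hd, hm, ← heq]
        simp

theorem euclid_batch (s b : Int) (hs : 0 < s) (hb : s ≤ b) :
    euclid s b = List.replicate (PySem.Int.floordiv b s).toNat s ++ euclid (PySem.Int.mod b s) s := by
  rw [PySem.Int.floordiv_eq_ediv_of_pos hs, PySem.Int.mod_eq_emod_of_pos hs]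
  exact euclid_batch_aux b.toNat s b hs hb le_rfl

theorem loopA_eq (fuel : Nat) : ∀ (out : List Int) (lng wdth : Int), 0 < lng → 0 < wdth →
    (lng * wdth).toNat < fuel →
    sqLoopA fuel out lng wdth (lng * wdth) = out ++ euclid lng wdth := by
  induction fuel with
  | zero => intro out lng wdth _ _ h; omega
  | succ fuel ih =>
    intro out lng wdth hl hw hfuel
    have hpos : 0 < lng * wdth := mul_pos hl hw
    rw [sqLoopA, if_pos hpos]
    by_cases hlt : lng < wdth
    · rw [if_pos hlt]
      have harea : lng * wdth - lng * lng = lng * (wdth - lng) := by ring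
      have hdec : lng * (wdth - lng) < lng * wdth := by nlinarith
      have hpos' : 0 < lng * (wdth - lng) := mul_pos hl (by omega)
      rw [harea, ih (out ++ [lng]) lng (wdth - lng) hl (by omega) (by omega)]
      conv_rhs => rw [euclid, if_pos ⟨hl, hw⟩, if_pos hlt]
      simp
    · rw [if_neg hlt]
      have hwl : wdth ≤ lng := by omega
      have harea : lng * wdth - wdth * wdth = (lng - wdth) * wdth := by ring
      conv_rhs => rw [euclid, if_pos ⟨hl, hw⟩, if_neg hlt]
      by_cases hz : lng - wdth = 0
      · -- last square: area becomes 0, both loops stop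
        rw [harea, hz]
        have h0 : (0 : Int) * wdth = 0 := by ring
        rw [h0]
        have hstop : ∀ f o l w, sqLoopA f o l w 0 = o := by
          intro f o l w; cases f <;> simp [sqLoopA]
        rw [hstop]
        conv_rhs => rw [euclid, if_neg (by omega)]
      · have hdec : (lng - wdth) * wdth < lng * wdth := by nlinarith
        have hpos' : 0 < (lng - wdth) * wdth := mul_pos (by omega) hw
        rw [harea, ih (out ++ [wdth]) (lng - wdth) wdth (by omega) hw (by omega)]
        simp

theorem loopB_eq_aux (n : Nat) : ∀ (lng wdth : Int), lng.toNat + wdth.toNat ≤ n →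
    ∀ (out : List Int), sqLoopB out lng wdth = out ++ euclid lng wdth := by
  induction n with
  | zero =>
    intro lng wdth hn out
    rw [sqLoopB, if_neg (by omega), euclid, if_neg (by omega)]
    simp
  | succ n ih =>
    intro lng wdth hn out
    by_cases hp : 0 < lng ∧ 0 < wdth
    · rw [sqLoopB, if_pos hp]
      by_cases hlt : lng < wdth
      · have hrlt := Int.emod_lt_of_pos wdth hp.1
        have hrnn := Int.emod_nonneg wdth (ne_of_gt hp.1)
        have hmod : PySem.Int.mod wdth lng = wdth % lng :=
          PySem.Int.mod_eq_emod_of_pos hp.1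
        rw [if_pos hlt, ih lng (PySem.Int.mod wdth lng) (by rw [hmod]; omega),
          euclid_batch lng wdth hp.1 (le_of_lt hlt),
          euclid_symm (PySem.Int.mod wdth lng) lng]
        simp
      · have hrlt := Int.emod_lt_of_pos lng hp.2
        have hrnn := Int.emod_nonneg lng (ne_of_gt hp.2)
        have hmod : PySem.Int.mod lng wdth = lng % wdth :=
          PySem.Int.mod_eq_emod_of_pos hp.2
        rw [if_neg hlt, ih (PySem.Int.mod lng wdth) wdth (by rw [hmod]; omega),
          euclid_symm lng wdth, euclid_batch wdth lng hp.2 (by omega)]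
        simp
    · rw [sqLoopB, if_neg hp, euclid, if_neg hp]
      simp

theorem loopB_eq (lng wdth : Int) : ∀ (out : List Int),
    sqLoopB out lng wdth = out ++ euclid lng wdth :=
  loopB_eq_aux (lng.toNat + wdth.toNat) lng wdth le_rfl

-- ===== VERDICT (by name: the statement is the Claim_ definition above) =====
theorem sq_in_rect_spec : Claim_unchanged_sq_in_rect := by
  intro lng wdth _ hnd
  rw [sq_in_rect, sq_in_rect_alt]
  by_cases heq : lng = wdth
  · rw [if_pos heq, if_pos heq]
  · rw [if_neg heq, if_neg heq]
    by_cases hp : 0 < lng ∧ 0 < wdth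
    · rw [loopA_eq _ [] lng wdth hp.1 hp.2 (by omega), loopB_eq]
    · have hnp : ¬ 0 < lng * wdth := by
        have hD : ¬ (lng < 0 ∧ wdth < 0 ∧ lng ≠ wdth) := hnd
        rcases lt_trichotomy lng 0 with h1 | h1 | h1 <;>
          rcases lt_trichotomy wdth 0 with h2 | h2 | h2
        · exact absurd ⟨h1, h2, heq⟩ hD
        · rw [h2]; simp
        · exact not_lt.mpr (le_of_lt (mul_neg_of_neg_of_pos h1 h2))
        · rw [h1]; simp
        · rw [h1]; simp
        · rw [h1]; simp
        · exact not_lt.mpr (le_of_lt (mul_neg_of_pos_of_neg h1 h2))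
        · rw [h2]; simp
        · exact absurd ⟨h1, h2⟩ hp
      have htz : (lng * wdth).toNat = 0 := by omega
      rw [htz]
      rw [show (0 + 1 : Nat) = 0 + 1 from rfl, sqLoopA, if_neg hnp,
        sqLoopB, if_neg hp]

theorem sq_in_rect_changed : Claim_changed_sq_in_rect := by
  unfold Claim_changed_sq_in_rect
  refine ⟨by decide, by decide, by decide, ?_, by decide⟩
  show sq_in_rect_alt (-1) (-2) = some []
  rw [sq_in_rect_alt, if_neg (by decide), sqLoopB, if_neg (by decide)]

theorem sq_in_rect_tight : Claim_exact_sq_in_rect := by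
  intro lng wdth _ hd
  obtain ⟨hl, hw, hne⟩ := hd
  have hpos : 0 < lng * wdth := mul_pos_of_neg_of_neg hl hw
  rw [sq_in_rect, sq_in_rect_alt, if_neg hne, if_neg hne]
  rw [sqLoopB, if_neg (by omega)]
  obtain ⟨m, hm⟩ : ∃ m, (lng * wdth).toNat + 1 = m + 2 := ⟨(lng * wdth).toNat - 1, by omega⟩
  rw [hm, sqLoopA, if_pos hpos]
  by_cases hlt : lng < wdth
  · rw [if_pos hlt]
    have hneg : ¬ 0 < lng * wdth - lng * lng := by nlinarith
    rw [sqLoopA, if_neg hneg]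
    simp
  · rw [if_neg hlt]
    have hneg : ¬ 0 < lng * wdth - wdth * wdth := by nlinarith
    rw [sqLoopA, if_neg hneg]
    simp
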